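-- pv_equiv track=rewrite | github.com/AntonJMLarsson/stitcher.py | stitcher.py | get_skipped_tuples
-- ===== SOURCE A (Python) =====
-- def get_skipped_tuples(cigtuples, ref_positions):
--     skipped_locs = []
--     l = 0
--     for c in cigtuples:
--         if c[0] == 0:
--             l += c[1]
--         elif c[0] == 3:
--             skipped_locs.append((ref_positions[l-1]+1, ref_positions[l]-1))
--     return skipped_locs
-- ===== SOURCE B (Python) =====
-- def get_skipped_tuples(cigtuples, ref_positions):
--     ls = [0]
--     for c in cigtuples:
--         ls.append(ls[-1] + (c[1] if c[0] == 0 else 0))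
--     return [(ref_positions[ls[i] - 1] + 1, ref_positions[ls[i]] - 1)
--             for i, c in enumerate(cigtuples) if c[0] == 3]
-- ===== Notes on version B (the rewrite author's own statement) =====
-- stated objective: alternative
-- what changed: Replaces the single interleaved accumulate-and-append loop by a prefix-sum table built in one pass plus a filtered list comprehension over enumerate that looks the offset up in the table.
import Mathlib
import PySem

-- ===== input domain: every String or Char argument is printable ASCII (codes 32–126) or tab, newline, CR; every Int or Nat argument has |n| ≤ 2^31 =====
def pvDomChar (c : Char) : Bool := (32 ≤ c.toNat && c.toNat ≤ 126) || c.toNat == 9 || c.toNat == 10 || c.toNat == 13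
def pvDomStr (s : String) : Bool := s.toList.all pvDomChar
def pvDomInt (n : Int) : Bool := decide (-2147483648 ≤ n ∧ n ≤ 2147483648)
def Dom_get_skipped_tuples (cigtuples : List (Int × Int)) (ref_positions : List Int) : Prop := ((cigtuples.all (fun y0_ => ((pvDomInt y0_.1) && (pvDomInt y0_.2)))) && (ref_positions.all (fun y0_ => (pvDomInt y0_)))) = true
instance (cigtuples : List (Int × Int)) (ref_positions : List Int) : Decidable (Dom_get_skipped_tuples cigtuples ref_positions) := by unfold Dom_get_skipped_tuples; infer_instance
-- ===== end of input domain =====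

-- B replaces A's interleaved accumulate-and-append loop by a prefix-sum table plus a
-- filtered lookup pass over enumerate (alternative decomposition, same cost).


-- ===== PORT A =====
def get_skipped_tuples (cigtuples : List (Int × Int)) (ref_positions : List Int) : List (Int × Int) :=
  (cigtuples.foldl
    (fun (st : List (Int × Int) × Int) c =>
      if c.1 = 0 then (st.1, st.2 + c.2)
      else if c.1 = 3 then
        (st.1 ++ [(((PySem.List.pyGet? ref_positions (st.2 - 1)).getD 0) + 1,
                   ((PySem.List.pyGet? ref_positions st.2).getD 0) - 1)], st.2)
      else st)
    ([], 0)).1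

-- ===== PORT B =====
def get_skipped_tuples_alt (cigtuples : List (Int × Int)) (ref_positions : List Int) : List (Int × Int) :=
  let ls := cigtuples.foldl
    (fun (acc : List Int) c => acc ++ [acc.getLastD 0 + (if c.1 = 0 then c.2 else 0)])
    [0]
  (PySem.List.enumerate cigtuples 0).filterMap
    (fun ic =>
      if ic.2.1 = 3 then
        some ((((PySem.List.pyGet? ref_positions ((PySem.List.pyGet? ls ic.1).getD 0 - 1)).getD 0) + 1),
              (((PySem.List.pyGet? ref_positions ((PySem.List.pyGet? ls ic.1).getD 0)).getD 0) - 1))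
      else none)

-- ===== PRECONDITION & SPEC =====
-- prefix sum of code-0 lengths strictly before a point (the value of Python's `l` there)
def pvPrefix (cigtuples : List (Int × Int)) : Int :=
  cigtuples.foldl (fun l c => if c.1 = 0 then l + c.2 else l) 0

-- Pre_ excludes exactly the inputs on which A raises IndexError: a code-3 tuple whose
-- running code-0 offset l makes ref_positions[l-1] or ref_positions[l] out of Python range.
def Pre_get_skipped_tuples (cigtuples : List (Int × Int)) (ref_positions : List Int) : Prop :=
  ∀ i ∈ List.range cigtuples.length,
    (cigtuples.getD i (0, 0)).1 = 3 →
      (-(ref_positions.length : Int) < pvPrefix (cigtuples.take i) ∧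
        pvPrefix (cigtuples.take i) < (ref_positions.length : Int))
instance (cigtuples : List (Int × Int)) (ref_positions : List Int) : Decidable (Pre_get_skipped_tuples cigtuples ref_positions) := by unfold Pre_get_skipped_tuples; infer_instance

def pvWitness_get_skipped_tuples : (List (Int × Int)) × List Int :=
  ([(0, 2), (3, 0), (0, 1)], [10, 11, 12, 13])

def Spec_get_skipped_tuples (cigtuples : List (Int × Int)) (ref_positions : List Int) (out : List (Int × Int)) : Prop := out = get_skipped_tuples_alt cigtuples ref_positions
instance (cigtuples : List (Int × Int)) (ref_positions : List Int) (out : List (Int × Int)) : Decidable (Spec_get_skipped_tuples cigtuples ref_positions out) := by unfold Spec_get_skipped_tuples; infer_instance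

-- ===== CLAIM (what is proved, stated in full; the proofs are below) =====
def Claim_equal_get_skipped_tuples : Prop := ∀ (cigtuples : List (Int × Int)) (ref_positions : List Int), Dom_get_skipped_tuples cigtuples ref_positions → Pre_get_skipped_tuples cigtuples ref_positions → Spec_get_skipped_tuples cigtuples ref_positions (get_skipped_tuples cigtuples ref_positions)

-- ===== LEMMAS AND PROOFS =====

def pvEntry (r : List Int) (l : Int) : Int × Int :=
  (((PySem.List.pyGet? r (l - 1)).getD 0) + 1, ((PySem.List.pyGet? r l).getD 0) - 1)

def pvSkips (r : List Int) : List (Int × Int) → Int → List (Int × Int)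
  | [], _ => []
  | c :: cs, l =>
    if c.1 = 0 then pvSkips r cs (l + c.2)
    else if c.1 = 3 then pvEntry r l :: pvSkips r cs l
    else pvSkips r cs l

def pvSums : List (Int × Int) → Int → List Int
  | [], l => [l]
  | c :: cs, l => l :: pvSums cs (l + (if c.1 = 0 then c.2 else 0))

theorem pvA_foldl (r : List Int) (cs : List (Int × Int)) (acc : List (Int × Int)) (l : Int) :
    (cs.foldl
      (fun (st : List (Int × Int) × Int) c =>
        if c.1 = 0 then (st.1, st.2 + c.2)
        else if c.1 = 3 then
          (st.1 ++ [(((PySem.List.pyGet? r (st.2 - 1)).getD 0) + 1,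
                     ((PySem.List.pyGet? r st.2).getD 0) - 1)], st.2)
        else st)
      (acc, l)).1 = acc ++ pvSkips r cs l := by
  induction cs generalizing acc l with
  | nil => simp [pvSkips]
  | cons c cs ih =>
    by_cases h0 : c.1 = 0
    · simp [List.foldl_cons, h0, pvSkips, ih]
    · by_cases h3 : c.1 = 3
      · simp [List.foldl_cons, h3, pvSkips, ih, pvEntry]
      · simp [List.foldl_cons, h0, h3, pvSkips, ih]

theorem pvB_table (cs : List (Int × Int)) (pre : List Int) (l : Int) :
    (cs.foldl
      (fun (acc : List Int) c => acc ++ [acc.getLastD 0 + (if c.1 = 0 then c.2 else 0)])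
      (pre ++ [l])) = pre ++ pvSums cs l := by
  induction cs generalizing pre l with
  | nil => simp [pvSums]
  | cons c cs ih =>
    have hlast : (pre ++ [l]).getLastD 0 = l := by
      simp [List.getLastD_eq_getLast?]
    calc ((c :: cs).foldl
          (fun (acc : List Int) c => acc ++ [acc.getLastD 0 + (if c.1 = 0 then c.2 else 0)])
          (pre ++ [l]))
        = (cs.foldl
          (fun (acc : List Int) c => acc ++ [acc.getLastD 0 + (if c.1 = 0 then c.2 else 0)])
          ((pre ++ [l]) ++ [l + (if c.1 = 0 then c.2 else 0)])) := by
          simp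
      _ = (pre ++ [l]) ++ pvSums cs (l + (if c.1 = 0 then c.2 else 0)) := ih _ _
      _ = pre ++ pvSums (c :: cs) l := by simp [pvSums]

theorem pvTbl_get (pre : List Int) (l : Int) (rest : List Int) :
    PySem.List.pyGet? (pre ++ l :: rest) ((pre.length : Nat) : Int) = some l := by
  rw [PySem.List.pyGet?_natCast]
  simp

theorem pvB_filter (r : List Int) (cs : List (Int × Int)) (k : Nat) (pre : List Int) (l : Int)
    (hk : pre.length = k) :
    (PySem.List.enumerate cs (k : Int)).filterMap
      (fun ic =>
        if ic.2.1 = 3 then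
          some ((((PySem.List.pyGet? r ((PySem.List.pyGet? (pre ++ pvSums cs l) ic.1).getD 0 - 1)).getD 0) + 1),
                (((PySem.List.pyGet? r ((PySem.List.pyGet? (pre ++ pvSums cs l) ic.1).getD 0)).getD 0) - 1))
        else none) = pvSkips r cs l := by
  induction cs generalizing k pre l with
  | nil => simp [PySem.List.enumerate_nil, pvSkips]
  | cons c cs ih =>
    have hget : PySem.List.pyGet? (pre ++ pvSums (c :: cs) l) ((k : Nat) : Int) = some l := by
      subst hk
      simp only [pvSums]
      exact pvTbl_get pre l (pvSums cs (l + (if c.1 = 0 then c.2 else 0)))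
    have hshift : pre ++ pvSums (c :: cs) l =
        (pre ++ [l]) ++ pvSums cs (l + (if c.1 = 0 then c.2 else 0)) := by
      simp [pvSums]
    have hlen : (pre ++ [l]).length = k + 1 := by simp [hk]
    have ihk := ih (k + 1) (pre ++ [l]) (l + (if c.1 = 0 then c.2 else 0)) hlen
    have hcast : ((k : Int) + 1) = ((k + 1 : Nat) : Int) := by push_cast; ring
    rw [PySem.List.enumerate_cons, List.filterMap_cons]
    by_cases h0 : c.1 = 0
    · have h3 : ¬ c.1 = 3 := by omega
      simp only [h0]
      rw [hshift, hcast, ihk]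
      simp [pvSkips, h0]
    · by_cases h3 : c.1 = 3
      · simp only [h3, reduceIte, hget, Option.getD_some]
        rw [hshift, hcast, ihk]
        simp [pvSkips, h3, pvEntry]
      · simp only [h3, reduceIte]
        rw [hshift, hcast, ihk]
        simp [pvSkips, h0, h3]

-- ===== VERDICT (by name: the statement is the Claim_ definition above) =====
theorem get_skipped_tuples_spec : Claim_equal_get_skipped_tuples := by
  intro cigtuples ref_positions _ _
  unfold Spec_get_skipped_tuples get_skipped_tuples get_skipped_tuples_alt
  rw [pvA_foldl]
  have htbl : (cigtuples.foldl
      (fun (acc : List Int) c => acc ++ [acc.getLastD 0 + (if c.1 = 0 then c.2 else 0)])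
      [0]) = pvSums cigtuples 0 := by
    simpa using pvB_table cigtuples [] 0
  rw [htbl]
  have := pvB_filter ref_positions cigtuples 0 [] 0 rfl
  simp only [List.nil_append] at this ⊢
  rw [← this]
  norm_num
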